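-- pv_equiv track=rewrite | github.com/BattleWoLFz99/Data-Structures-and-Algorithms-in-Python | by Days/W73 DFS/7. hl634 Word Squres.py | get_prefix_to_words
-- ===== SOURCE A (Python) =====
-- def get_prefix_to_words(words):
--     prefix_to_words = {}
--     for word in words:
--         for i in range(len(word)):
--             prefix = word[:i + 1]
--             if prefix not in prefix_to_words:
--                 prefix_to_words[prefix] = []
--             prefix_to_words[prefix].append(word)
--     return prefix_to_words
-- ===== SOURCE B (Python) =====
-- def get_prefix_to_words(words):
--     # Two-phase: collect the distinct non-empty prefixes in first-occurrence
--     # order, then build each bucket by one filter pass over the words.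
--     prefixes = dict.fromkeys(w[:i] for w in words for i in range(1, len(w) + 1))
--     return {p: [w for w in words if w.startswith(p)] for p in prefixes}
-- ===== Notes on version B (the rewrite author's own statement) =====
-- stated objective: idiomatic
-- what changed: A accumulates per-prefix lists in one pass by mutating dict entries; B first dedups all non-empty prefixes with dict.fromkeys and then builds each bucket by an independent startswith filter over the words.
import Mathlib
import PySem

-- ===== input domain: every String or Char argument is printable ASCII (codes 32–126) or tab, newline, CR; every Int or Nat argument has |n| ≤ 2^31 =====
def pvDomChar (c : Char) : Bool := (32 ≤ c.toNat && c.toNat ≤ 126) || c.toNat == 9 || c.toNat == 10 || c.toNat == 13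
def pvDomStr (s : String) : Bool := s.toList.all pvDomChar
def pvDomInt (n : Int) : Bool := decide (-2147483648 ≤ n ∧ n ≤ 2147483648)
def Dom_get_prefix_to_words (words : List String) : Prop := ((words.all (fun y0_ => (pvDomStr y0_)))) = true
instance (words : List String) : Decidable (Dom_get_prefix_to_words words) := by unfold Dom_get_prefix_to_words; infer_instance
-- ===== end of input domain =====

-- B replaces A's single-pass mutation of dict-of-lists by: dedup all non-empty prefixes
-- (dict.fromkeys), then build each bucket with an independent startswith filter (idiomatic).

-- ===== PORT A =====
def get_prefix_to_words (words : List String) : List (String × List String) :=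
  (words.foldl (fun d word =>
      (PySem.List.pyRange 0 (PySem.Str.len word) 1).foldl (fun d i =>
        let pfx := PySem.Str.slice word none (some (i + 1))      -- word[:i + 1]
        let d := if d.contains pfx then d
                 else d.insert pfx ([] : List String)            -- if prefix not in …: … = []
        d.modify pfx [] (fun l => l ++ [word])) d)               -- …[prefix].append(word)
    PySem.Dict.empty).items

-- ===== PORT B =====
def pvPrefixes (w : String) : List String :=
  (PySem.List.pyRange 1 (PySem.Str.len w + 1) 1).map
    (fun i => PySem.Str.slice w none (some i))                      -- w[:i], i = 1 … len(w)

def get_prefix_to_words_alt (words : List String) : List (String × List String) :=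
  let prefixes := PySem.List.dedup (words.flatMap pvPrefixes)       -- dict.fromkeys(…)
  prefixes.map (fun p => (p, words.filter (fun w => PySem.Str.startswith w p)))

-- ===== PRECONDITION & SPEC =====
def Spec_get_prefix_to_words (words : List String) (out : List (String × List String)) : Prop := out = get_prefix_to_words_alt words
instance (words : List String) (out : List (String × List String)) : Decidable (Spec_get_prefix_to_words words out) := by unfold Spec_get_prefix_to_words; infer_instance

-- ===== CLAIM (what is proved, stated in full; the proofs are below) =====
def Claim_equal_get_prefix_to_words : Prop := ∀ (words : List String), Dom_get_prefix_to_words words → Spec_get_prefix_to_words words (get_prefix_to_words words)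

-- ===== LEMMAS AND PROOFS =====

-- A's "if absent insert [] then append" step is one modify-with-default.
theorem stepA_eq_modify (d : PySem.Dict String (List String)) (p w : String) :
    (if d.contains p then d else d.insert p ([] : List String)).modify p [] (fun l => l ++ [w])
      = d.modify p [] (fun l => l ++ [w]) := by
  by_cases h : d.contains p = true
  · simp [h]
  · rw [if_neg h]
    simp only [PySem.Dict.modify, PySem.Dict.getD_insert_self, PySem.Dict.insert_insert_self]
    rw [PySem.Dict.getD_of_not_contains _ _ (by simpa using h)]

theorem pyRange_zero (n : ℕ) :
    PySem.List.pyRange 0 (n : ℤ) 1 = List.map (fun k : ℕ => (k : ℤ)) (List.range n) := by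
  simp only [PySem.List.pyRange]
  rcases Nat.eq_zero_or_pos n with h | h
  · simp [h]
  · rw [if_neg (by norm_num), if_pos (by norm_num), if_pos (by exact_mod_cast h)]
    have h2 : ((n : ℤ) - 0 + 1 - 1) / 1 = (n : ℤ) := by simp
    rw [h2, Int.toNat_natCast]
    exact List.map_congr_left (fun k _ => by simp)

theorem pyRange_one (n : ℕ) :
    PySem.List.pyRange 1 ((n : ℤ) + 1) 1 = List.map (fun k : ℕ => (k : ℤ) + 1) (List.range n) := by
  simp only [PySem.List.pyRange]
  rcases Nat.eq_zero_or_pos n with h | h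
  · simp [h]
  · rw [if_neg (by norm_num), if_pos (by norm_num), if_pos (by omega)]
    have h2 : ((n : ℤ) + 1 - 1 + 1 - 1) / 1 = (n : ℤ) := by simp
    rw [h2, Int.toNat_natCast]
    exact List.map_congr_left (fun k _ => by simp [add_comm])

theorem prefFun_eq (w : String) (k : ℕ) :
    PySem.Str.slice w none (some ((k : ℤ) + 1)) = String.ofList (w.toList.take (k + 1)) := by
  have h : ((k : ℤ) + 1).toNat = k + 1 := by omega
  simp [PySem.Str.slice, PySem.List.slice_to (xs := w.toList) (b := (k : ℤ) + 1) (by omega), h]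

theorem pvPrefixes_eq (w : String) :
    pvPrefixes w = (List.range w.toList.length).map (fun k => String.ofList (w.toList.take (k + 1))) := by
  unfold pvPrefixes
  rw [PySem.Str.len, pyRange_one, List.map_map]
  exact List.map_congr_left (fun k _ => prefFun_eq w k)

theorem mem_pvPrefixes (w p : String) :
    p ∈ pvPrefixes w ↔ (PySem.Str.startswith w p = true ∧ p ≠ "") := by
  rw [pvPrefixes_eq]
  simp only [List.mem_map, List.mem_range]
  constructor
  · rintro ⟨k, hk, rfl⟩
    constructor
    · simp [PySem.Str.startswith, PySem.Chars.startswith, List.isPrefixOf_iff_prefix,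
        List.take_prefix]
    · intro h
      have hlen := congrArg List.length (congrArg String.toList h)
      simp at hlen
      rw [hlen] at hk
      simp at hk
  · rintro ⟨hpre, hne⟩
    have hpfx : p.toList <+: w.toList := by
      simpa [PySem.Str.startswith, PySem.Chars.startswith, List.isPrefixOf_iff_prefix] using hpre
    have hlen : 1 ≤ p.toList.length := by
      rcases Nat.eq_zero_or_pos p.toList.length with h | h
      · exact absurd (by apply String.ext; simpa [List.length_eq_zero_iff] using h) hne
      · exact h
    refine ⟨p.toList.length - 1, ?_, ?_⟩
    · have := hpfx.length_le; omega
    · have htake : w.toList.take (p.toList.length - 1 + 1) = p.toList := by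
        rw [Nat.sub_add_cancel hlen]
        exact (List.prefix_iff_eq_take.mp hpfx).symm
      rw [htake]
      apply String.ext
      simp

theorem nodup_pvPrefixes (w : String) : (pvPrefixes w).Nodup := by
  rw [pvPrefixes_eq]
  refine List.Nodup.map_on ?_ (List.nodup_range)
  intro x hx y hy hxy
  have : (String.ofList (w.toList.take (x + 1))).toList = (String.ofList (w.toList.take (y + 1))).toList := by
    rw [hxy]
  simp only [String.toList_ofList] at this ⊢
  have := congrArg List.length this
  simp only [List.length_take] at this
  simp only [List.mem_range] at hx hy
  omega

theorem foldl_flatMap {α γ δ : Type} (f : δ → γ → δ) (g : α → List γ) (l : List α) (d : δ) :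
    (l.flatMap g).foldl f d = l.foldl (fun d a => (g a).foldl f d) d := by
  induction l generalizing d with
  | nil => rfl
  | cons a t ih => simp [List.flatMap_cons, List.foldl_append, ih]

theorem filter_flatMap {α γ : Type} (g : α → List γ) (P : γ → Bool) (l : List α) :
    (l.flatMap g).filter P = l.flatMap (fun a => (g a).filter P) := by
  induction l with
  | nil => rfl
  | cons a t ih => simp [List.flatMap_cons, List.filter_append, ih]

theorem map_flatMap' {α γ δ : Type} (g : α → List γ) (f : γ → δ) (l : List α) :
    (l.flatMap g).map f = l.flatMap (fun a => (g a).map f) := by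
  induction l with
  | nil => rfl
  | cons a t ih => simp [List.flatMap_cons, ih]

theorem filter_eq_flatMap {α : Type} (P : α → Bool) (l : List α) :
    l.filter P = l.flatMap (fun a => if P a then [a] else []) := by
  induction l with
  | nil => rfl
  | cons a t ih =>
    by_cases h : P a = true <;> simp [h, ih]

theorem filter_beq_of_nodup {α : Type} [BEq α] [LawfulBEq α] (l : List α) (hl : l.Nodup) (k : α) :
    l.filter (fun p => p == k) = if k ∈ l then [k] else [] := by
  induction l with
  | nil => simp
  | cons a t ih =>
    simp only [List.nodup_cons] at hl
    by_cases h : a = k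
    · subst h
      simp [if_neg hl.1, ih hl.2]
    · simp only [List.filter_cons, beq_iff_eq, h, if_false, List.mem_cons]
      rw [ih hl.2]
      simp [Ne.symm h]

-- the flat list of (prefix, word) events A processes, in order
def pvPairs (words : List String) : List (String × String) :=
  words.flatMap (fun w => (pvPrefixes w).map (fun p => (p, w)))

theorem dictA_eq_foldl_pairs (words : List String) :
    (words.foldl (fun d word =>
        (PySem.List.pyRange 0 (PySem.Str.len word) 1).foldl (fun d i =>
          let pfx := PySem.Str.slice word none (some (i + 1))
          let d := if d.contains pfx then d
                   else d.insert pfx ([] : List String)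
          d.modify pfx [] (fun l => l ++ [word])) d)
      PySem.Dict.empty)
    = (pvPairs words).foldl (fun d q => d.modify q.1 [] (fun l => l ++ [q.2])) PySem.Dict.empty := by
  rw [pvPairs, foldl_flatMap]
  apply PySem.List.foldl_congr_mem
  intro d w _
  -- inner loop of A over range(len w) = fold of modify over the prefixes of w
  have hrange : PySem.List.pyRange 0 (PySem.Str.len w) 1
      = List.map (fun k : ℕ => (k : ℤ)) (List.range w.toList.length) := by
    rw [PySem.Str.len, pyRange_zero]
  rw [hrange, List.foldl_map, List.foldl_map, pvPrefixes_eq, List.foldl_map]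
  apply PySem.List.foldl_congr_mem
  intro d k _
  simp only []
  rw [prefFun_eq w k, stepA_eq_modify]

theorem value_at_key (words : List String) (k : String) (hk : k ≠ "") :
    ((pvPairs words).filter (fun q => q.1 == k)).map (fun q => q.2)
      = words.filter (fun w => PySem.Str.startswith w k) := by
  rw [pvPairs, filter_flatMap, map_flatMap', filter_eq_flatMap]
  apply List.flatMap_congr
  intro w _
  rw [List.filter_map]
  have hcomp : ((fun q : String × String => q.1 == k) ∘ (fun p => (p, w))) = (fun p => p == k) := rfl
  rw [hcomp, filter_beq_of_nodup _ (nodup_pvPrefixes w) k]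
  by_cases hmem : k ∈ pvPrefixes w
  · have h1 : PySem.Chars.startswith w.toList k.toList = true := by
      simpa [PySem.Str.startswith] using ((mem_pvPrefixes w k).mp hmem).1
    simp [hmem, h1]
  · have h0 : ¬ (PySem.Str.startswith w k = true) := by
      intro h
      exact hmem ((mem_pvPrefixes w k).mpr ⟨h, hk⟩)
    have h1 : PySem.Chars.startswith w.toList k.toList = false := by
      rw [← Bool.not_eq_true]
      simpa [PySem.Str.startswith] using h0
    simp [hmem, h1]

-- ===== VERDICT (by name: the statement is the Claim_ definition above) =====
theorem get_prefix_to_words_spec : Claim_equal_get_prefix_to_words := by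
  intro words _
  unfold Spec_get_prefix_to_words get_prefix_to_words get_prefix_to_words_alt
  rw [dictA_eq_foldl_pairs]
  have hkeys : ((pvPairs words).foldl (fun d q => d.modify q.1 [] (fun l => l ++ [q.2]))
      PySem.Dict.empty).keys = PySem.Set.ofList ((pvPairs words).map (fun q => q.1)) := by
    rw [PySem.Dict.keys_foldl_modify_key (pvPairs words) (fun q => q.1) []
      (fun _ q l => l ++ [q.2]) PySem.Dict.empty]
    rw [PySem.Dict.keys_empty, PySem.Set.update_nil_left]
  have hnodup : ((pvPairs words).foldl (fun d q => d.modify q.1 [] (fun l => l ++ [q.2]))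
      PySem.Dict.empty).keys.Nodup :=
    PySem.Dict.nodup_keys_foldl_modify_key (pvPairs words) (fun q => q.1) []
      (fun _ q l => l ++ [q.2]) PySem.Dict.empty (by simp [PySem.Dict.keys_empty])
  rw [PySem.Dict.items_eq_map_keys _ hnodup ([] : List String), hkeys]
  have hfst : (pvPairs words).map (fun q => q.1) = words.flatMap pvPrefixes := by
    rw [pvPairs, map_flatMap']
    apply List.flatMap_congr
    intro w _
    rw [List.map_map]
    show List.map (fun p => p) (pvPrefixes w) = pvPrefixes w
    simp
  rw [hfst, PySem.List.dedup_eq_ofList]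
  apply List.map_congr_left
  intro k hkmem
  have hkin : k ∈ words.flatMap pvPrefixes := (PySem.Set.mem_ofList _ k).mp hkmem
  have hkne : k ≠ "" := by
    rcases List.mem_flatMap.mp hkin with ⟨w, _, hw⟩
    exact ((mem_pvPrefixes w k).mp hw).2
  rw [PySem.Dict.getD_foldl_modify_append (pvPairs words) PySem.Dict.empty k]
  rw [PySem.Dict.getD_empty, List.nil_append, value_at_key words k hkne]
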